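-- pv_equiv track=rewrite | github.com/atharvakarval-dev/Form-Flow-AI | form-flow-backend/services/ai/voice/stt/corrections.py | join_spelled_letters
-- ===== SOURCE A (Python) =====
-- def join_spelled_letters(text: str) -> str:
--     """
--     Join spelled out letters intelligently.
--
--     Handles:
--     - "j o h n" → "john"
--     - "j o h n at g m a i l" → "john@gmail"
--     - "j o h n dot c o m" → "john.com"
--
--     Args:
--         text: Spelled out text
--
--     Returns:
--         Joined text
--     """
--     words = text.split()
--     result = []
--     current = []
--
--     for word in words:
--         word_lower = word.lower()
--
--         # Check for separators
--         if word_lower in ['at', '@']: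
--             if current:
--                 result.append(''.join(current))
--                 current = []
--             result.append('@')
--         elif word_lower in ['dot', '.']:
--             if current:
--                 result.append(''.join(current))
--                 current = []
--             result.append('.')
--         elif len(word) == 1 and word.isalpha():
--             # Single letter - add to current accumulator
--             current.append(word_lower)
--         else:
--             # Multi-letter word
--             if current:
--                 result.append(''.join(current))
--                 current = []
--             result.append(word)
--
--     # Don't forget remaining letters
--     if current:
--         result.append(''.join(current))
--
--     return ''.join(result)
-- ===== SOURCE B (Python) =====
-- def join_spelled_letters(text: str) -> str:
--     """One token per word, no accumulator: grouping never affects ''.join output."""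
--     tokens = []
--     for word in text.split():
--         wl = word.lower()
--         if wl in ('at', '@'):
--             tokens.append('@')
--         elif wl in ('dot', '.'):
--             tokens.append('.')
--         elif len(word) == 1 and word.isalpha():
--             tokens.append(wl)
--         else:
--             tokens.append(word)
--     return ''.join(tokens)
-- ===== Notes on version B (the rewrite author's own statement) =====
-- stated objective: simpler
-- what changed: B drops A's letter-run accumulator and flush logic entirely: since both joins use the empty separator, grouping is irrelevant, so B maps each word to exactly one token in a single stateless pass and joins once.
import Mathlib
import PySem

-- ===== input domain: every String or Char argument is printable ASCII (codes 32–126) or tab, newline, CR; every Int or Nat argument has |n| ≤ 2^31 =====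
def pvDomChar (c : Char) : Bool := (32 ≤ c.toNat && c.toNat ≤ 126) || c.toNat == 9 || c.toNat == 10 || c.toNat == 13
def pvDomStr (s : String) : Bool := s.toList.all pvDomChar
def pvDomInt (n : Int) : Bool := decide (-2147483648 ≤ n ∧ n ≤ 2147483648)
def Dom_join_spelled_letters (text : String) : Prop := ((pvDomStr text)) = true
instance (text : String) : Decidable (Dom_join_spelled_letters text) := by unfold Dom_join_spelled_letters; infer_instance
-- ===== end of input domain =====

-- B replaces A's letter-run accumulator and flush logic with a stateless one-token-per-word pass (objective: simpler).

-- ===== PORT A =====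
-- one loop iteration of A: state = (result, current)
def jslStep (st : List String × List String) (word : String) : List String × List String :=
  let wl := PySem.Str.lower word
  if wl = "at" ∨ wl = "@" then
    ((if st.2 ≠ [] then st.1 ++ [PySem.Str.join "" st.2] else st.1) ++ ["@"], [])
  else if wl = "dot" ∨ wl = "." then
    ((if st.2 ≠ [] then st.1 ++ [PySem.Str.join "" st.2] else st.1) ++ ["."], [])
  else if PySem.Str.len word = 1 ∧ PySem.Str.strIsalpha word then
    (st.1, st.2 ++ [wl])
  else
    ((if st.2 ≠ [] then st.1 ++ [PySem.Str.join "" st.2] else st.1) ++ [word], [])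

def join_spelled_letters (text : String) : String :=
  let words := PySem.Str.split₀ text
  let st := words.foldl jslStep ([], [])
  let result := if st.2 ≠ [] then st.1 ++ [PySem.Str.join "" st.2] else st.1
  PySem.Str.join "" result

-- ===== PORT B =====
def jslToken (word : String) : String :=
  let wl := PySem.Str.lower word
  if wl = "at" ∨ wl = "@" then "@"
  else if wl = "dot" ∨ wl = "." then "."
  else if PySem.Str.len word = 1 ∧ PySem.Str.strIsalpha word then wl
  else word

def join_spelled_letters_alt (text : String) : String :=
  PySem.Str.join "" ((PySem.Str.split₀ text).map jslToken)

-- ===== PRECONDITION & SPEC =====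
def Spec_join_spelled_letters (text : String) (out : String) : Prop := out = join_spelled_letters_alt text
instance (text : String) (out : String) : Decidable (Spec_join_spelled_letters text out) := by unfold Spec_join_spelled_letters; infer_instance

-- ===== CLAIM (what is proved, stated in full; the proofs are below) =====
def Claim_equal_join_spelled_letters : Prop := ∀ (text : String), Dom_join_spelled_letters text → Spec_join_spelled_letters text (join_spelled_letters text)

-- ===== LEMMAS AND PROOFS =====

theorem intercalate_nil_sep (l : List (List Char)) : [].intercalate l = l.flatten := by
  simp [List.intercalate]
  induction l with
  | nil => simp
  | cons x xs ih => cases xs <;> simp_all [List.intersperse]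

theorem chars_join_nil (l : List (List Char)) : PySem.Chars.join [] l = l.flatten := by
  simp [PySem.Chars.join, intercalate_nil_sep]

theorem toList_join_empty (l : List String) :
    (PySem.Str.join "" l).toList = (l.map String.toList).flatten := by
  simp [pysem, chars_join_nil]

-- character content of A's loop state (result ++ current, all flattened)
def jslOut (st : List String × List String) : List Char :=
  (st.1.map String.toList).flatten ++ (st.2.map String.toList).flatten

theorem jslOut_step (st : List String × List String) (w : String) :
    jslOut (jslStep st w) = jslOut st ++ (jslToken w).toList := by
  unfold jslStep jslToken
  dsimp only
  split_ifs <;>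
    simp_all [jslOut, chars_join_nil]

theorem jslOut_foldl (ws : List String) (st : List String × List String) :
    jslOut (ws.foldl jslStep st) =
      jslOut st ++ ((ws.map jslToken).map String.toList).flatten := by
  induction ws generalizing st with
  | nil => simp
  | cons w ws ih => simp [ih, jslOut_step, List.append_assoc]

theorem join_spelled_letters_toList (text : String) :
    (join_spelled_letters text).toList = (join_spelled_letters_alt text).toList := by
  unfold join_spelled_letters join_spelled_letters_alt
  dsimp only
  have h := jslOut_foldl (PySem.Str.split₀ text) ([], [])
  simp only [jslOut, List.map_nil, List.flatten_nil, List.nil_append] at h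
  by_cases hc : ((PySem.Str.split₀ text).foldl jslStep ([], [])).2 = []
  · rw [if_neg (by simp [hc])]
    rw [toList_join_empty, toList_join_empty]
    rw [hc] at h
    simpa using h
  · rw [if_pos (by simp [hc]), toList_join_empty, toList_join_empty, List.map_append,
        List.flatten_append, ← h]
    simp [chars_join_nil]

-- ===== VERDICT (by name: the statement is the Claim_ definition above) =====
theorem join_spelled_letters_spec : Claim_equal_join_spelled_letters := by
  intro text _
  exact String.toList_inj.mp (join_spelled_letters_toList text)
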